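-- pv_equiv track=rewrite | github.com/vinayakram/cliniq | pages/ai_insights.py | triage_score
-- ===== SOURCE A (Python) =====
-- def triage_score(symptoms):
--     if not symptoms:
--         return 1
--     high = ['chest pain', 'bleeding', 'stroke', 'seizure', 'unconscious']
--     med = ['fever', 'vomiting', 'severe pain', 'cough', 'headache']
--     s = symptoms.lower()
--     if any(x in s for x in high): return 5
--     if any(x in s for x in med): return 3
--     return 1
-- ===== SOURCE B (Python) =====
-- def triage_score(symptoms):
--     if not symptoms:
--         return 1
--     table = (('chest pain', 5), ('bleeding', 5), ('stroke', 5), ('seizure', 5),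
--              ('unconscious', 5), ('fever', 3), ('vomiting', 3), ('severe pain', 3),
--              ('cough', 3), ('headache', 3))
--     s = symptoms.lower()
--     best = 1
--     for i in range(len(s)):
--         for kw, sc in table:
--             if sc > best and s.startswith(kw, i):
--                 best = sc
--     return best
-- ===== Notes on version B (the rewrite author's own statement) =====
-- stated objective: alternative
-- what changed: Replaces the two per-keyword substring-containment passes ('kw in s' over high then med lists) by a single left-to-right scan over every position of the lowered string that tests s.startswith(kw, i) against one merged (keyword, score) table, keeping a running best score.
import Mathlib
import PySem

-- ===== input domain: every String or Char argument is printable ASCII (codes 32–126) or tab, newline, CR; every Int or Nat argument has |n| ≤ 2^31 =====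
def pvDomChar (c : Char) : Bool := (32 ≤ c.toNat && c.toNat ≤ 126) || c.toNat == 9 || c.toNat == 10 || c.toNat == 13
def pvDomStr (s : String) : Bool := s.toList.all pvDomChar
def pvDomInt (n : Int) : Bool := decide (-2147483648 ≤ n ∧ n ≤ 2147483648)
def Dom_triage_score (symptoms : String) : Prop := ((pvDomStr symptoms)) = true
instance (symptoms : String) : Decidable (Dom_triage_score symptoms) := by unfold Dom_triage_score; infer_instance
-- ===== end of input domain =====

-- B replaces A's two per-keyword substring-containment passes by one positional scan of the
-- lowered string, testing startswith against a merged (keyword, score) table with a running best.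


-- ===== PORT A =====
def triage_score (symptoms : String) : Int :=
  if symptoms = "" then 1
  else
    let high := ["chest pain", "bleeding", "stroke", "seizure", "unconscious"]
    let med := ["fever", "vomiting", "severe pain", "cough", "headache"]
    let s := PySem.Str.lower symptoms
    if high.any (fun x => PySem.Str.isIn x s) then 5
    else if med.any (fun x => PySem.Str.isIn x s) then 3
    else 1

-- ===== PORT B =====
def tableB : List (String × Int) :=
  [("chest pain", 5), ("bleeding", 5), ("stroke", 5), ("seizure", 5),
   ("unconscious", 5), ("fever", 3), ("vomiting", 3), ("severe pain", 3),
   ("cough", 3), ("headache", 3)]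

-- Python's s.startswith(kw, i) for 0 ≤ i ≤ len(s) is exactly Chars.startswith on (s.toList.drop i).
def triage_score_alt (symptoms : String) : Int :=
  if symptoms = "" then 1
  else
    let l := (PySem.Str.lower symptoms).toList
    (List.range l.length).foldl
      (fun best i =>
        tableB.foldl
          (fun b p =>
            if p.2 > b ∧ PySem.Chars.startswith (l.drop i) p.1.toList then p.2 else b)
          best)
      1

-- ===== PRECONDITION & SPEC =====
def Spec_triage_score (symptoms : String) (out : Int) : Prop := out = triage_score_alt symptoms
instance (symptoms : String) (out : Int) : Decidable (Spec_triage_score symptoms out) := by unfold Spec_triage_score; infer_instance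

-- ===== CLAIM (what is proved, stated in full; the proofs are below) =====
def Claim_equal_triage_score : Prop := ∀ (symptoms : String), Dom_triage_score symptoms → Spec_triage_score symptoms (triage_score symptoms)

-- ===== LEMMAS AND PROOFS =====

-- "some keyword of the 5-tier starts at position i"
def hiAt (l : List Char) (i : Nat) : Bool :=
  PySem.Chars.startswith (l.drop i) "chest pain".toList ||
  PySem.Chars.startswith (l.drop i) "bleeding".toList ||
  PySem.Chars.startswith (l.drop i) "stroke".toList ||
  PySem.Chars.startswith (l.drop i) "seizure".toList ||
  PySem.Chars.startswith (l.drop i) "unconscious".toList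

def meAt (l : List Char) (i : Nat) : Bool :=
  PySem.Chars.startswith (l.drop i) "fever".toList ||
  PySem.Chars.startswith (l.drop i) "vomiting".toList ||
  PySem.Chars.startswith (l.drop i) "severe pain".toList ||
  PySem.Chars.startswith (l.drop i) "cough".toList ||
  PySem.Chars.startswith (l.drop i) "headache".toList

def scoreAt (l : List Char) (i : Nat) : Int :=
  if hiAt l i then 5 else if meAt l i then 3 else 1

-- the guarded update "if v > b and cond then v else b" is a conditional max-update
lemma step_eq_max (v b : Int) (c : Bool) (hv : 1 ≤ v) (hb : 1 ≤ b) :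
    (if v > b ∧ c = true then v else b) = max b (if c then v else 1) := by
  cases c
  · simp only [Bool.false_eq_true, and_false, if_false]
    exact (max_eq_left hb).symm
  · simp only [and_true, if_true]
    split_ifs with h
    · exact (max_eq_right (le_of_lt h)).symm
    · exact (max_eq_left (not_lt.mp h)).symm

-- hoisting a max out of a fold of plain max-updates
lemma max_fold_hoist (cond : String × Int → Bool) (L : List (String × Int)) :
    ∀ (b1 b2 : Int),
      L.foldl (fun a p => max a (if cond p then p.2 else 1)) (max b1 b2)
        = max b1 (L.foldl (fun a p => max a (if cond p then p.2 else 1)) b2) := by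
  induction L with
  | nil => intro b1 b2; rfl
  | cons y L ihy =>
      intro b1 b2
      simp only [List.foldl]
      rw [max_assoc, ihy]

-- the max of the ten per-keyword contributions equals the tiered score (pure Bool/Int fact)
lemma max_chain_eq (c1 c2 c3 c4 c5 c6 c7 c8 c9 c10 : Bool) :
    max (max (max (max (max (max (max (max (max (max (1 : Int)
      (if c1 then 5 else 1)) (if c2 then 5 else 1)) (if c3 then 5 else 1))
      (if c4 then 5 else 1)) (if c5 then 5 else 1)) (if c6 then 3 else 1))
      (if c7 then 3 else 1)) (if c8 then 3 else 1)) (if c9 then 3 else 1))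
      (if c10 then 3 else 1)
    = (if (c1 || c2 || c3 || c4 || c5) then 5 else if (c6 || c7 || c8 || c9 || c10) then 3 else 1) := by
  revert c1 c2 c3 c4 c5 c6 c7 c8 c9 c10; decide

-- hoisting a max out of a fold of conditional max-updates (b never decreases)
lemma foldl_step_hoist (cond : String × Int → Bool) (L : List (String × Int))
    (hL : ∀ p ∈ L, (1 : Int) ≤ p.2) :
    ∀ b : Int, 1 ≤ b →
      L.foldl (fun b p => if p.2 > b ∧ cond p = true then p.2 else b) b
        = max b (L.foldl (fun a p => max a (if cond p then p.2 else 1)) 1) := by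
  induction L with
  | nil => intro b hb; simp; omega
  | cons x L ih =>
      intro b hb
      have hx : (1 : Int) ≤ x.2 := hL x (by simp)
      have hL' : ∀ p ∈ L, (1 : Int) ≤ p.2 := fun p hp => hL p (by simp [hp])
      simp only [List.foldl]
      rw [step_eq_max x.2 b (cond x) hx hb,
          ih hL' _ (by have := le_max_left b (if cond x then x.2 else 1); omega)]
      have h1 : max (1 : Int) (if cond x then x.2 else 1) = max (if cond x then x.2 else 1) 1 :=
        max_comm _ _
      rw [h1, max_fold_hoist]
      rw [max_assoc]

-- the inner fold over the merged table = one max-update with the position's tiered score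
lemma inner_eq (l : List Char) (i : Nat) (b : Int) (hb : 1 ≤ b) :
    tableB.foldl
      (fun b p =>
        if p.2 > b ∧ PySem.Chars.startswith (l.drop i) p.1.toList then p.2 else b)
      b = max b (scoreAt l i) := by
  rw [foldl_step_hoist (fun p => PySem.Chars.startswith (l.drop i) p.1.toList) tableB
        (by intro p hp; fin_cases hp <;> norm_num) b hb]
  congr 1
  simp only [tableB, List.foldl]
  rw [max_chain_eq]
  rfl

def tierOf (l : List Char) (is : List Nat) : Int :=
  if is.any (hiAt l) then 5 else if is.any (meAt l) then 3 else 1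

lemma tierOf_ge_one (l : List Char) (is : List Nat) : 1 ≤ tierOf l is := by
  unfold tierOf; split_ifs <;> omega

lemma fold_max_eq (l : List Char) (is : List Nat) :
    ∀ b : Int, 1 ≤ b →
      is.foldl (fun b i => max b (scoreAt l i)) b = max b (tierOf l is) := by
  induction is with
  | nil => intro b hb; simp [tierOf]; omega
  | cons i is ih =>
      intro b hb
      simp only [List.foldl]
      rw [ih (max b (scoreAt l i)) (by unfold scoreAt; split_ifs <;> omega)]
      unfold tierOf scoreAt
      simp only [List.any_cons]
      by_cases h1 : hiAt l i <;> by_cases h2 : meAt l i <;>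
      by_cases h3 : is.any (hiAt l) <;> by_cases h4 : is.any (meAt l) <;>
      simp [h1, h2, h3, h4] <;> omega

lemma scan_eq (l : List Char) :
    (List.range l.length).foldl
      (fun best i =>
        tableB.foldl
          (fun b p =>
            if p.2 > b ∧ PySem.Chars.startswith (l.drop i) p.1.toList then p.2 else b)
          best)
      1 = tierOf l (List.range l.length) := by
  have congr1 : ∀ (is : List Nat) (b : Int), 1 ≤ b →
      is.foldl
        (fun best i =>
          tableB.foldl
            (fun b p =>
              if p.2 > b ∧ PySem.Chars.startswith (l.drop i) p.1.toList then p.2 else b)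
            best) b = is.foldl (fun b i => max b (scoreAt l i)) b := by
    intro is
    induction is with
    | nil => intro b hb; rfl
    | cons i is ih =>
        intro b hb
        simp only [List.foldl]
        rw [inner_eq l i b hb, ih _ (by unfold scoreAt; split_ifs <;> omega)]
  rw [congr1 _ 1 le_rfl, fold_max_eq l _ 1 le_rfl]
  have := tierOf_ge_one l (List.range l.length)
  omega

-- any-over-|| splits
lemma any_orb {a : Type} (L : List a) (f g : a → Bool) :
    L.any (fun x => f x || g x) = (L.any f || L.any g) := by
  induction L with
  | nil => rfl
  | cons x L ih =>
      simp only [List.any_cons, ih, Bool.or_assoc, Bool.or_left_comm]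

-- ∃ position < len matched ↔ the keyword occurs as a substring (keywords are nonempty)
lemma any_startswith_iff (l : List Char) (kw : List Char) (hkw : kw ≠ []) :
    ((List.range l.length).any (fun i => PySem.Chars.startswith (l.drop i) kw)) = PySem.Chars.isIn kw l := by
  rcases h : PySem.Chars.isIn kw l with _ | _
  · simp only [List.any_eq_false]
    intro i hi
    rw [Bool.not_eq_true, ← Bool.not_eq_true, PySem.Chars.startswith_iff]
    intro hpre
    have : PySem.Chars.isIn kw l = true :=
      (PySem.Chars.exists_prefix_drop_iff_isIn kw l).1 ⟨i, hpre⟩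
    simp [h] at this
  · obtain ⟨j, hj⟩ := (PySem.Chars.exists_prefix_drop_iff_isIn kw l).2 h
    have hjlt : j < l.length := by
      by_contra hge
      push_neg at hge
      rw [List.drop_eq_nil_of_le hge] at hj
      exact hkw (List.prefix_nil.mp hj)
    simp only [List.any_eq_true]
    exact ⟨j, by simpa using List.mem_range.mpr hjlt, (PySem.Chars.startswith_iff _ _).2 hj⟩

-- ===== VERDICT (by name: the statement is the Claim_ definition above) =====
theorem triage_score_spec : Claim_equal_triage_score := by
  intro symptoms _
  unfold Spec_triage_score triage_score triage_score_alt
  by_cases h0 : symptoms = ""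
  · simp [h0]
  · simp only [h0, if_false]
    rw [scan_eq]
    set l := (PySem.Str.lower symptoms).toList with hl
    unfold tierOf
    have hi : (List.range l.length).any (hiAt l)
        = (PySem.Chars.isIn "chest pain".toList l || PySem.Chars.isIn "bleeding".toList l ||
           PySem.Chars.isIn "stroke".toList l || PySem.Chars.isIn "seizure".toList l ||
           PySem.Chars.isIn "unconscious".toList l) := by
      unfold hiAt
      rw [any_orb, any_orb, any_orb, any_orb,
          any_startswith_iff l _ (by decide), any_startswith_iff l _ (by decide),
          any_startswith_iff l _ (by decide), any_startswith_iff l _ (by decide),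
          any_startswith_iff l _ (by decide)]
    have hm : (List.range l.length).any (meAt l)
        = (PySem.Chars.isIn "fever".toList l || PySem.Chars.isIn "vomiting".toList l ||
           PySem.Chars.isIn "severe pain".toList l || PySem.Chars.isIn "cough".toList l ||
           PySem.Chars.isIn "headache".toList l) := by
      unfold meAt
      rw [any_orb, any_orb, any_orb, any_orb,
          any_startswith_iff l _ (by decide), any_startswith_iff l _ (by decide),
          any_startswith_iff l _ (by decide), any_startswith_iff l _ (by decide),
          any_startswith_iff l _ (by decide)]
    rw [hi, hm]
    simp only [List.any_cons, List.any_nil, Bool.or_false, PySem.Str.isIn_eq, ← hl]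
    simp only [Bool.or_eq_true, or_assoc]
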